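-- pv_equiv track=rewrite | github.com/mbae/Sight-Reading-DSL | noteRelations.py | generateNotesInScale
-- ===== SOURCE A (Python) =====
-- allKeysSharp = ["a", "as", "b", "c", "cs", "d", "ds", "e", "f", "fs", "g", "gs"]
--
-- allKeysFlat = ["a", "bf", "b", "c", "df", "d", "ef", "e", "f", "gf", "g", "af"]
--
-- flattedKeys = ["f", "bf", "ef", "af", "df", "gf", "cf"]
--
-- majorIntervalsAscending = [2,2,1,2,2,2,1]
--
-- majorIntervalsDescending = majorIntervalsAscending[::-1]
--
-- minorIntervalsAscending = [2,1,2,2,1,2,2]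
--
-- minorIntervalsDescending = minorIntervalsAscending[::-1]
--
-- def generateNotesInScale(key, quality):
-- 	ascendingIntervals = []
-- 	descendingIntervals = []
-- 	if quality == "major":
-- 		ascendingIntervals = majorIntervalsAscending
-- 		descendingIntervals = majorIntervalsDescending
-- 	else:
-- 		ascendingIntervals = minorIntervalsAscending
-- 		descendingIntervals = minorIntervalsDescending
--
-- 	startingIndex = None
-- 	if key in flattedKeys:
-- 		startingIndex = allKeysFlat.index(key)
-- 	else:
-- 		startingIndex = allKeysSharp.index(key)
--
-- 	# Get the notes below
-- 	i = 0
-- 	allPossibleScaleNotes = []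
-- 	currentIndex = startingIndex
-- 	while currentIndex >= 0:
-- 		allPossibleScaleNotes.append(currentIndex)
-- 		currentIndex -= descendingIntervals[i]
-- 		i = (i + 1) % 7
--
-- 	# Get the notes above
-- 	i = 1
-- 	currentIndex = startingIndex + ascendingIntervals[0]
-- 	while currentIndex <= 87:
-- 		allPossibleScaleNotes.append(currentIndex)
-- 		currentIndex += ascendingIntervals[i]
-- 		i = (i + 1) % 7
-- 	return allPossibleScaleNotes
-- ===== SOURCE B (Python) =====
-- allKeysSharp = ["a", "as", "b", "c", "cs", "d", "ds", "e", "f", "fs", "g", "gs"]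
-- allKeysFlat = ["a", "bf", "b", "c", "df", "d", "ef", "e", "f", "gf", "g", "af"]
-- flattedKeys = ["f", "bf", "ef", "af", "df", "gf", "cf"]
--
-- def generateNotesInScale(key, quality):
-- 	residues = {0, 2, 4, 5, 7, 9, 11} if quality == "major" else {0, 2, 3, 5, 7, 8, 10}
-- 	if key in flattedKeys:
-- 		startingIndex = allKeysFlat.index(key)
-- 	else:
-- 		startingIndex = allKeysSharp.index(key)
-- 	below = [k for k in range(startingIndex, -1, -1) if (k - startingIndex) % 12 in residues]
-- 	above = [k for k in range(startingIndex + 1, 88) if (k - startingIndex) % 12 in residues]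
-- 	return below + above
-- ===== Notes on version B (the rewrite author's own statement) =====
-- stated objective: simpler
-- what changed: Replaces A's two interval-stepping while loops (with rotating index i mod 7) by computing the scale's pitch-class residue set mod 12 once and filtering a descending and an ascending range of keyboard positions by residue membership; the startingIndex lookup (and its ValueError on unknown keys, excluded by Pre_) is kept.
import Mathlib
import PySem

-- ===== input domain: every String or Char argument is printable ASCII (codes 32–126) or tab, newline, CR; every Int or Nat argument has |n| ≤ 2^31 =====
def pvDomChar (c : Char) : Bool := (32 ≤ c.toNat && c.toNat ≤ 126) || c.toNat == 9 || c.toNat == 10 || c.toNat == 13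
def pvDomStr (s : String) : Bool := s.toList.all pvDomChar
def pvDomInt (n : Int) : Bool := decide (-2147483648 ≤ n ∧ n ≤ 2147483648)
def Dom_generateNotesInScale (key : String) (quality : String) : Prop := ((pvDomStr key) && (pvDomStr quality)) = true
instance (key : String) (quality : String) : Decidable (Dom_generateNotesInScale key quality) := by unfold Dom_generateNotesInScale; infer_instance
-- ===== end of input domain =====

-- B replaces A's two interval-stepping while loops by a single modular-residue filter over the
-- keyboard positions (objective: simpler).

-- ===== PORT A =====
def pvAllKeysSharp : List String := ["a", "as", "b", "c", "cs", "d", "ds", "e", "f", "fs", "g", "gs"]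
def pvAllKeysFlat : List String := ["a", "bf", "b", "c", "df", "d", "ef", "e", "f", "gf", "g", "af"]
def pvFlattedKeys : List String := ["f", "bf", "ef", "af", "df", "gf", "cf"]
def pvMajorAsc : List Int := [2,2,1,2,2,2,1]
def pvMajorDesc : List Int := pvMajorAsc.reverse   -- majorIntervalsAscending[::-1]
def pvMinorAsc : List Int := [2,1,2,2,1,2,2]
def pvMinorDesc : List Int := pvMinorAsc.reverse

-- 'while currentIndex >= 0' loop; fuel only makes the recursion total (200 is never exhausted
-- on the indices A reaches: the start index is < 12 and every step is ≥ 1).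
def pvDescLoop (fuel : Nat) (desc : List Int) (i : Nat) (cur : Int) (acc : List Int) : List Int :=
  match fuel with
  | 0 => acc
  | fuel + 1 =>
    if cur ≥ 0 then pvDescLoop fuel desc ((i + 1) % 7) (cur - desc.getD i 0) (acc ++ [cur])
    else acc

-- 'while currentIndex <= 87' loop, same fuel guard.
def pvAscLoop (fuel : Nat) (asc : List Int) (i : Nat) (cur : Int) (acc : List Int) : List Int :=
  match fuel with
  | 0 => acc
  | fuel + 1 =>
    if cur ≤ 87 then pvAscLoop fuel asc ((i + 1) % 7) (cur + asc.getD i 0) (acc ++ [cur])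
    else acc

def generateNotesInScale (key : String) (quality : String) : List Int :=
  let ascendingIntervals := if quality == "major" then pvMajorAsc else pvMinorAsc
  let descendingIntervals := if quality == "major" then pvMajorDesc else pvMinorDesc
  -- list.index; under Pre_ the element is present, so index? is some (A raises ValueError otherwise)
  let startingIndex : Int :=
    if pvFlattedKeys.contains key then ((PySem.List.index? pvAllKeysFlat key).getD 0 : Nat)
    else ((PySem.List.index? pvAllKeysSharp key).getD 0 : Nat)
  let below := pvDescLoop 200 descendingIntervals 0 startingIndex []
  pvAscLoop 200 ascendingIntervals 1 (startingIndex + ascendingIntervals.getD 0 0) below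

-- ===== PORT B =====
def generateNotesInScale_alt (key : String) (quality : String) : List Int :=
  let residues : List Int := if quality == "major" then [0,2,4,5,7,9,11] else [0,2,3,5,7,8,10]
  let s : Int :=
    if pvFlattedKeys.contains key then ((PySem.List.index? pvAllKeysFlat key).getD 0 : Nat)
    else ((PySem.List.index? pvAllKeysSharp key).getD 0 : Nat)
  let below := (PySem.List.pyRange s (-1) (-1)).filter
    (fun k => residues.contains (PySem.Int.mod (k - s) 12))
  let above := (PySem.List.pyRange (s + 1) 88 1).filter
    (fun k => residues.contains (PySem.Int.mod (k - s) 12))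
  below ++ above

-- ===== PRECONDITION & SPEC =====
-- Pre_ excludes exactly the keys on which A's '.index' raises ValueError: a key in flattedKeys
-- must occur in allKeysFlat (this excludes "cf"), any other key must occur in allKeysSharp.
def Pre_generateNotesInScale (key : String) (quality : String) : Prop :=
  (if pvFlattedKeys.contains key then pvAllKeysFlat.contains key else pvAllKeysSharp.contains key) = true
instance (key : String) (quality : String) : Decidable (Pre_generateNotesInScale key quality) := by
  unfold Pre_generateNotesInScale; infer_instance
def pvWitness_generateNotesInScale : String × String := ("c", "major")

def Spec_generateNotesInScale (key : String) (quality : String) (out : List Int) : Prop := out = generateNotesInScale_alt key quality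
instance (key : String) (quality : String) (out : List Int) : Decidable (Spec_generateNotesInScale key quality out) := by unfold Spec_generateNotesInScale; infer_instance

-- ===== CLAIM (what is proved, stated in full; the proofs are below) =====
def Claim_equal_generateNotesInScale : Prop := ∀ (key : String) (quality : String), Dom_generateNotesInScale key quality → Pre_generateNotesInScale key quality → Spec_generateNotesInScale key quality (generateNotesInScale key quality)

-- ===== LEMMAS AND PROOFS =====

-- Under Pre_, the key is one of the 17 literal valid keys.
theorem pv_key_cases (key : String) (h : Pre_generateNotesInScale key "") :
    key ∈ (["f","bf","ef","af","df","gf",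
            "a","as","b","c","cs","d","ds","e","fs","g","gs"] : List String) := by
  unfold Pre_generateNotesInScale at h
  by_cases hf : pvFlattedKeys.contains key = true
  · simp only [hf, if_true] at h
    simp only [pvAllKeysFlat, List.contains_eq_mem, List.mem_cons, decide_eq_true_eq] at h
    simp only [pvFlattedKeys, List.contains_eq_mem, List.mem_cons, decide_eq_true_eq] at hf
    simp only [List.mem_cons]
    rcases hf with h'|h'|h'|h'|h'|h'|h'|h' <;> simp_all
  · simp only [hf, if_false, Bool.false_eq_true] at h
    simp only [pvAllKeysSharp, List.contains_eq_mem, List.mem_cons, decide_eq_true_eq] at h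
    simp only [List.mem_cons]
    rcases h with h'|h'|h'|h'|h'|h'|h'|h'|h'|h'|h'|h'|h' <;> simp_all

-- ===== VERDICT (by name: the statement is the Claim_ definition above) =====
theorem generateNotesInScale_spec : Claim_equal_generateNotesInScale := by
  intro key quality _ hpre
  unfold Spec_generateNotesInScale generateNotesInScale generateNotesInScale_alt
  have hk := pv_key_cases key (by
    unfold Pre_generateNotesInScale at hpre ⊢; exact hpre)
  generalize hb : (quality == "major") = b
  simp only [List.mem_cons, List.not_mem_nil, or_false] at hk
  rcases hk with h|h|h|h|h|h|h|h|h|h|h|h|h|h|h|h|h <;> subst h <;> cases b <;> decide
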